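-- pv_equiv track=rewrite | github.com/LUCAS-LYX025/qa-toolkit | src/qa_toolkit/core/api_dev_tools.py | _describe_mapping_change
-- ===== SOURCE A (Python) =====
-- from typing import Any, Dict, List, Tuple
--
-- def _describe_mapping_change(baseline: Any, target: Any) -> Tuple[str, str]:
--     baseline_map = baseline if isinstance(baseline, dict) else {}
--     target_map = target if isinstance(target, dict) else {}
--     if baseline_map == target_map:
--         return "", "low"
--
--     added_keys = sorted(set(target_map) - set(baseline_map))
--     removed_keys = sorted(set(baseline_map) - set(target_map))
--     changed_keys = sorted(
--         key for key in set(baseline_map) & set(target_map)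
--         if baseline_map.get(key) != target_map.get(key)
--     )
--
--     parts = []
--     if added_keys:
--         parts.append(f"新增字段: {', '.join(added_keys)}")
--     if removed_keys:
--         parts.append(f"删除字段: {', '.join(removed_keys)}")
--     if changed_keys:
--         parts.append(f"字段值变化: {', '.join(changed_keys)}")
--
--     if removed_keys or changed_keys:
--         return "; ".join(parts), "high" if removed_keys else "medium"
--     return "; ".join(parts), "medium"
-- ===== SOURCE B (Python) =====
-- def _describe_mapping_change(baseline, target):
--     baseline_map = baseline if isinstance(baseline, dict) else {}
--     target_map = target if isinstance(target, dict) else {}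
--
--     # merge two sorted key sequences with two pointers
--     b_keys = sorted(baseline_map)
--     t_keys = sorted(target_map)
--     added, removed, changed = [], [], []
--     i = j = 0
--     while i < len(b_keys) or j < len(t_keys):
--         if j >= len(t_keys) or (i < len(b_keys) and b_keys[i] < t_keys[j]):
--             removed.append(b_keys[i])
--             i += 1
--         elif i >= len(b_keys) or t_keys[j] < b_keys[i]:
--             added.append(t_keys[j])
--             j += 1
--         else:
--             k = b_keys[i]
--             if baseline_map[k] != target_map[k]:
--                 changed.append(k)
--             i += 1
--             j += 1
--
--     if not (added or removed or changed):
--         return "", "low"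
--
--     parts = []
--     if added:
--         parts.append(f"新增字段: {', '.join(added)}")
--     if removed:
--         parts.append(f"删除字段: {', '.join(removed)}")
--     if changed:
--         parts.append(f"字段值变化: {', '.join(changed)}")
--     return "; ".join(parts), "high" if removed else "medium"
-- ===== Notes on version B (the rewrite author's own statement) =====
-- stated objective: alternative
-- what changed: Replaces the dict-equality early return and the three set-difference/intersection expressions each followed by its own sort by one two-pointer merge over the two pre-sorted key lists that emits added/removed/changed directly in sorted order; the equal case falls out as 'no differences found' instead of comparing the dicts.
import Mathlib
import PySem

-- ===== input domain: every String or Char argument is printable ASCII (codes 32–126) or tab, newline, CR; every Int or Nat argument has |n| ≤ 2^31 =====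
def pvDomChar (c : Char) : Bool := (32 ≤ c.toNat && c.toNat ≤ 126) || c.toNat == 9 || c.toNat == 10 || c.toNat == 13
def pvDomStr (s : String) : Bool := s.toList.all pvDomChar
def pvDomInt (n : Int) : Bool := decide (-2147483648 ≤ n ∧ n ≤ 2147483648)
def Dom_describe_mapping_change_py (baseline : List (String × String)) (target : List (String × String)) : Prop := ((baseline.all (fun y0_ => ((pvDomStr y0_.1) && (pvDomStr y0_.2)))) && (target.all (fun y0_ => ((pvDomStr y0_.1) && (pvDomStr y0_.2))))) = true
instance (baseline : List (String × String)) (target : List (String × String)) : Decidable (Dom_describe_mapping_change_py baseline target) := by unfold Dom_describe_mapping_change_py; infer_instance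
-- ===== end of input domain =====

-- B replaces A's dict-equality check and three set operations (each with its own sort) by a single
-- two-pointer merge of the two sorted key lists emitting added/removed/changed in order (objective: alternative).

-- ===== PORT A =====
-- Python dict == ignores insertion order: same size and every baseline item present in target
def pyDictEqA (b t : PySem.Dict String String) : Bool :=
  (PySem.Dict.size b == PySem.Dict.size t) &&
    (PySem.Dict.items b).all (fun kv => PySem.Dict.get? t kv.1 == some kv.2)

def describe_mapping_change_py (baseline : List (String × String)) (target : List (String × String)) : String × String :=
  let baseline_map := PySem.Dict.ofList baseline
  let target_map := PySem.Dict.ofList target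
  if pyDictEqA baseline_map target_map then ("", "low")
  else
    let added_keys := PySem.List.sorted
      (PySem.Set.diff (PySem.Set.ofList (PySem.Dict.keys target_map)) (PySem.Dict.keys baseline_map)) (fun k => k) false
    let removed_keys := PySem.List.sorted
      (PySem.Set.diff (PySem.Set.ofList (PySem.Dict.keys baseline_map)) (PySem.Dict.keys target_map)) (fun k => k) false
    let changed_keys := PySem.List.sorted
      ((PySem.Set.inter (PySem.Set.ofList (PySem.Dict.keys baseline_map)) (PySem.Dict.keys target_map)).filter
        (fun k => !(PySem.Dict.get? baseline_map k == PySem.Dict.get? target_map k))) (fun k => k) false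
    let parts : List String := []
    let parts := if !added_keys.isEmpty then parts ++ ["新增字段: " ++ PySem.Str.join ", " added_keys] else parts
    let parts := if !removed_keys.isEmpty then parts ++ ["删除字段: " ++ PySem.Str.join ", " removed_keys] else parts
    let parts := if !changed_keys.isEmpty then parts ++ ["字段值变化: " ++ PySem.Str.join ", " changed_keys] else parts
    if !removed_keys.isEmpty || !changed_keys.isEmpty then
      (PySem.Str.join "; " parts, if !removed_keys.isEmpty then "high" else "medium")
    else
      (PySem.Str.join "; " parts, "medium")

-- ===== PORT B =====
-- B's while loop over indices i, j into the two sorted key lists, ported as the structural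
-- recursion on the two remaining suffixes; returns (added, removed, changed).
-- (baseline_map[k] != target_map[k] is ported via get?: exact, the key is present in both maps in that branch)
def mergeClassify (bm tm : PySem.Dict String String) :
    List String → List String → List String × List String × List String
  | [], [] => ([], [], [])
  | b :: bs, [] =>
      let r := mergeClassify bm tm bs []
      (r.1, b :: r.2.1, r.2.2)
  | [], t :: ts =>
      let r := mergeClassify bm tm [] ts
      (t :: r.1, r.2.1, r.2.2)
  | b :: bs, t :: ts =>
      if b < t then
        let r := mergeClassify bm tm bs (t :: ts)
        (r.1, b :: r.2.1, r.2.2)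
      else if t < b then
        let r := mergeClassify bm tm (b :: bs) ts
        (t :: r.1, r.2.1, r.2.2)
      else
        let r := mergeClassify bm tm bs ts
        if !(PySem.Dict.get? bm b == PySem.Dict.get? tm b) then (r.1, r.2.1, b :: r.2.2)
        else r
  termination_by bs ts => bs.length + ts.length

def describe_mapping_change_py_alt (baseline : List (String × String)) (target : List (String × String)) : String × String :=
  let baseline_map := PySem.Dict.ofList baseline
  let target_map := PySem.Dict.ofList target
  let b_keys := PySem.List.sorted (PySem.Dict.keys baseline_map) (fun k => k) false
  let t_keys := PySem.List.sorted (PySem.Dict.keys target_map) (fun k => k) false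
  let r := mergeClassify baseline_map target_map b_keys t_keys
  let added := r.1
  let removed := r.2.1
  let changed := r.2.2
  if added.isEmpty && removed.isEmpty && changed.isEmpty then ("", "low")
  else
    let parts : List String := []
    let parts := if !added.isEmpty then parts ++ ["新增字段: " ++ PySem.Str.join ", " added] else parts
    let parts := if !removed.isEmpty then parts ++ ["删除字段: " ++ PySem.Str.join ", " removed] else parts
    let parts := if !changed.isEmpty then parts ++ ["字段值变化: " ++ PySem.Str.join ", " changed] else parts
    (PySem.Str.join "; " parts, if !removed.isEmpty then "high" else "medium")

-- ===== PRECONDITION & SPEC =====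
def Spec_describe_mapping_change_py (baseline : List (String × String)) (target : List (String × String)) (out : String × String) : Prop := out = describe_mapping_change_py_alt baseline target
instance (baseline : List (String × String)) (target : List (String × String)) (out : String × String) : Decidable (Spec_describe_mapping_change_py baseline target out) := by unfold Spec_describe_mapping_change_py; infer_instance

-- ===== CLAIM (what is proved, stated in full; the proofs are below) =====
def Claim_equal_describe_mapping_change_py : Prop := ∀ (baseline : List (String × String)) (target : List (String × String)), Dom_describe_mapping_change_py baseline target → Spec_describe_mapping_change_py baseline target (describe_mapping_change_py baseline target)
-- ===== LEMMAS AND PROOFS =====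
theorem contains_eq_false_of_not_mem {l : List String} {x : String} (h : x ∉ l) :
    l.contains x = false := by simpa using h

theorem mergeClassify_eq (bm tm : PySem.Dict String String) (bk : List String)
    (hb : bk.Pairwise (· < ·)) (tk : List String) (ht : tk.Pairwise (· < ·)) :
    mergeClassify bm tm bk tk =
      (tk.filter (fun t => !bk.contains t),
       bk.filter (fun b => !tk.contains b),
       bk.filter (fun b => tk.contains b && !(PySem.Dict.get? bm b == PySem.Dict.get? tm b))) := by
  induction bk generalizing tk with
  | nil =>
    induction tk with
    | nil => simp [mergeClassify]
    | cons t ts iht =>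
      rw [mergeClassify, iht (List.pairwise_cons.mp ht).2]
      simp
  | cons b bs ihb =>
    have hb' := (List.pairwise_cons.mp hb).2
    have hball := (List.pairwise_cons.mp hb).1
    induction tk with
    | nil =>
      rw [mergeClassify, ihb hb' [] List.Pairwise.nil]
      simp
    | cons t ts iht =>
      have ht' := (List.pairwise_cons.mp ht).2
      have htall := (List.pairwise_cons.mp ht).1
      rw [mergeClassify]
      by_cases hlt : b < t
      · rw [if_pos hlt, ihb hb' (t :: ts) ht]
        have hbt : ∀ x ∈ t :: ts, b < x := by
          intro x hx
          rcases List.mem_cons.mp hx with rfl | hx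
          · exact hlt
          · exact hlt.trans (htall x hx)
        have hnb : b ∉ t :: ts := fun h => lt_irrefl b (hbt b h)
        have e1 : (t :: ts).filter (fun x => !(b :: bs).contains x)
            = (t :: ts).filter (fun x => !bs.contains x) :=
          List.filter_congr (fun x hx => by
            simp only [List.contains_cons, beq_false_of_ne (hbt x hx).ne', Bool.false_or])
        have e2 : (b :: bs).filter (fun x => !(t :: ts).contains x)
            = b :: bs.filter (fun x => !(t :: ts).contains x) := by
          rw [List.filter_cons, if_pos (by rw [contains_eq_false_of_not_mem hnb]; rfl)]
        have e3 : (b :: bs).filter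
              (fun x => (t :: ts).contains x && !(PySem.Dict.get? bm x == PySem.Dict.get? tm x))
            = bs.filter (fun x => (t :: ts).contains x && !(PySem.Dict.get? bm x == PySem.Dict.get? tm x)) := by
          rw [List.filter_cons, if_neg (by rw [contains_eq_false_of_not_mem hnb, Bool.false_and]; simp)]
        rw [← e1, e2, e3]
      · rw [if_neg hlt]
        by_cases hgt : t < b
        · rw [if_pos hgt, iht ht']
          have htb : ∀ x ∈ b :: bs, t < x := by
            intro x hx
            rcases List.mem_cons.mp hx with rfl | hx
            · exact hgt
            · exact hgt.trans (hball x hx)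
          have hnt : t ∉ b :: bs := fun h => lt_irrefl t (htb t h)
          have e1 : (t :: ts).filter (fun x => !(b :: bs).contains x)
              = t :: ts.filter (fun x => !(b :: bs).contains x) := by
            rw [List.filter_cons, if_pos (by rw [contains_eq_false_of_not_mem hnt]; rfl)]
          have e2 : (b :: bs).filter (fun x => !(t :: ts).contains x)
              = (b :: bs).filter (fun x => !ts.contains x) :=
            List.filter_congr (fun x hx => by
              simp only [List.contains_cons, beq_false_of_ne (htb x hx).ne', Bool.false_or])
          have e3 : (b :: bs).filter
                (fun x => (t :: ts).contains x && !(PySem.Dict.get? bm x == PySem.Dict.get? tm x))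
              = (b :: bs).filter
                (fun x => ts.contains x && !(PySem.Dict.get? bm x == PySem.Dict.get? tm x)) :=
            List.filter_congr (fun x hx => by
              simp only [List.contains_cons, beq_false_of_ne (htb x hx).ne', Bool.false_or])
          rw [e1, ← e2, ← e3]
        · have heq : b = t := le_antisymm (not_lt.mp hgt) (not_lt.mp hlt)
          subst heq
          rw [if_neg hgt, ihb hb' ts ht']
          have e1 : (b :: ts).filter (fun x => !(b :: bs).contains x)
              = ts.filter (fun x => !bs.contains x) := by
            rw [List.filter_cons, if_neg (by simp)]
            exact List.filter_congr (fun x hx => by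
              simp only [List.contains_cons, beq_false_of_ne (htall x hx).ne', Bool.false_or])
          have e2 : (b :: bs).filter (fun x => !(b :: ts).contains x)
              = bs.filter (fun x => !ts.contains x) := by
            rw [List.filter_cons, if_neg (by simp)]
            exact List.filter_congr (fun x hx => by
              simp only [List.contains_cons, beq_false_of_ne (hball x hx).ne', Bool.false_or])
          have hcongr : bs.filter
                (fun x => (b :: ts).contains x && !(PySem.Dict.get? bm x == PySem.Dict.get? tm x))
              = bs.filter
                (fun x => ts.contains x && !(PySem.Dict.get? bm x == PySem.Dict.get? tm x)) :=
            List.filter_congr (fun x hx => by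
              simp only [List.contains_cons, beq_false_of_ne (hball x hx).ne', Bool.false_or])
          rw [e1, e2]
          by_cases hp : (PySem.Dict.get? bm b == PySem.Dict.get? tm b)
          · rw [if_neg (by simp [hp]), List.filter_cons,
              if_neg (by simp [hp]), hcongr]
          · rw [if_pos (by simp [hp]), List.filter_cons,
              if_pos (by simp [hp]), hcongr]

theorem pairwise_lt_sorted_nodup (l : List String) (h : l.Nodup) :
    (PySem.List.sorted l (fun k => k) false).Pairwise (· < ·) := by
  have h1 := PySem.List.sorted_pairwise l (fun k => k)
  have h2 : (PySem.List.sorted l (fun k => k) false).Nodup :=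
    (PySem.List.sorted_perm l (fun k => k) false).nodup_iff.mpr h
  exact (h1.and h2).imp (fun hab => lt_of_le_of_ne hab.1 hab.2)

theorem pyDictEqA_iff (b t : PySem.Dict String String)
    (hbn : b.keys.Nodup) (htn : t.keys.Nodup) :
    pyDictEqA b t = true ↔
      ((∀ k, k ∈ b.keys ↔ k ∈ t.keys) ∧ ∀ k ∈ b.keys, b.get? k = t.get? k) := by
  have hkl : ∀ (d : PySem.Dict String String), d.keys.length = PySem.Dict.size d := by
    intro d; simp [PySem.Dict.keys, PySem.Dict.size]
  constructor
  · intro h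
    obtain ⟨hsize, hitems⟩ := by simpa [pyDictEqA, List.all_eq_true] using h
    have hget : ∀ k ∈ b.keys, b.get? k = t.get? k ∧ k ∈ t.keys := by
      intro k hk
      obtain ⟨v, hmemi⟩ : ∃ v, (k, v) ∈ b.items := by simpa [PySem.Dict.keys] using hk
      have h1 : b.get? k = some v := PySem.Dict.get?_of_mem_items b hmemi hbn
      have h2 : t.get? k = some v := hitems k v hmemi
      refine ⟨h1.trans h2.symm, ?_⟩
      rw [← PySem.Dict.contains_iff_mem_keys, PySem.Dict.contains_eq_isSome_get?, h2]
      rfl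
    have hsub : b.keys ⊆ t.keys := fun k hk => (hget k hk).2
    have hperm : b.keys.Perm t.keys :=
      (List.subperm_of_subset hbn hsub).perm_of_length_le (by rw [hkl, hkl, hsize])
    exact ⟨fun k => ⟨fun hk => hperm.mem_iff.mp hk, fun hk => hperm.mem_iff.mpr hk⟩,
      fun k hk => (hget k hk).1⟩
  · rintro ⟨hmem, hget⟩
    have hperm : b.keys.Perm t.keys := (List.perm_ext_iff_of_nodup hbn htn).mpr hmem
    simp only [pyDictEqA, Bool.and_eq_true, beq_iff_eq, List.all_eq_true, Prod.forall]
    constructor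
    · rw [← hkl, ← hkl, hperm.length_eq]
    · intro k v hkv
      rw [← hget k (PySem.Dict.mem_keys_of_mem_items b hkv)]
      exact PySem.Dict.get?_of_mem_items b hkv hbn

-- ===== VERDICT (by name: the statement is the Claim_ definition above) =====
theorem describe_mapping_change_py_spec : Claim_equal_describe_mapping_change_py := by
  intro baseline target _
  simp only [Spec_describe_mapping_change_py, describe_mapping_change_py, describe_mapping_change_py_alt]
  have hbn : (PySem.Dict.ofList baseline).keys.Nodup := PySem.Dict.nodup_keys_ofList baseline
  have htn : (PySem.Dict.ofList target).keys.Nodup := PySem.Dict.nodup_keys_ofList target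
  set bm := PySem.Dict.ofList baseline with hbm
  set tm := PySem.Dict.ofList target with htm
  set bk := PySem.List.sorted bm.keys (fun k => k) false with hbk
  set tk := PySem.List.sorted tm.keys (fun k => k) false with htk
  have hbkp : bk.Pairwise (· < ·) := pairwise_lt_sorted_nodup _ hbn
  have htkp : tk.Pairwise (· < ·) := pairwise_lt_sorted_nodup _ htn
  rw [mergeClassify_eq bm tm bk hbkp tk htkp]
  have hbknd : bk.Nodup := (PySem.List.sorted_perm bm.keys (fun k => k) false).nodup_iff.mpr hbn
  have htknd : tk.Nodup := (PySem.List.sorted_perm tm.keys (fun k => k) false).nodup_iff.mpr htn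
  have hmembk : ∀ x, x ∈ bk ↔ x ∈ bm.keys := fun x => PySem.List.mem_sorted bm.keys (fun k => k) false x
  have hmemtk : ∀ x, x ∈ tk ↔ x ∈ tm.keys := fun x => PySem.List.mem_sorted tm.keys (fun k => k) false x
  set FA := tk.filter (fun t => !bk.contains t) with hFA
  set FR := bk.filter (fun b => !tk.contains b) with hFR
  set FC := bk.filter (fun b => tk.contains b && !(PySem.Dict.get? bm b == PySem.Dict.get? tm b)) with hFC
  have hAeq : PySem.List.sorted
      (PySem.Set.diff (PySem.Set.ofList tm.keys) bm.keys) (fun k => k) false = FA := by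
    apply PySem.List.sorted_eq_of_perm_of_pairwise_lt
    · refine (List.perm_ext_iff_of_nodup (htknd.filter _)
        (PySem.Set.nodup_diff _ _ (PySem.Set.nodup_ofList _))).mpr ?_
      intro a
      simp [List.mem_filter, PySem.Set.mem_diff, PySem.Set.mem_ofList, hmembk, hmemtk]
    · exact List.Pairwise.filter _ htkp
  have hReq : PySem.List.sorted
      (PySem.Set.diff (PySem.Set.ofList bm.keys) tm.keys) (fun k => k) false = FR := by
    apply PySem.List.sorted_eq_of_perm_of_pairwise_lt
    · refine (List.perm_ext_iff_of_nodup (hbknd.filter _)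
        (PySem.Set.nodup_diff _ _ (PySem.Set.nodup_ofList _))).mpr ?_
      intro a
      simp [List.mem_filter, PySem.Set.mem_diff, PySem.Set.mem_ofList, hmembk, hmemtk]
    · exact List.Pairwise.filter _ hbkp
  have hCeq : PySem.List.sorted
      ((PySem.Set.inter (PySem.Set.ofList bm.keys) tm.keys).filter
        (fun k => !(PySem.Dict.get? bm k == PySem.Dict.get? tm k))) (fun k => k) false = FC := by
    apply PySem.List.sorted_eq_of_perm_of_pairwise_lt
    · refine (List.perm_ext_iff_of_nodup (hbknd.filter _)
        (((PySem.Set.nodup_inter _ _ (PySem.Set.nodup_ofList _))).filter _)).mpr ?_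
      intro a
      simp [List.mem_filter, PySem.Set.mem_inter, PySem.Set.mem_ofList, hmembk, hmemtk]
      tauto
    · exact List.Pairwise.filter _ hbkp
  rw [hAeq, hReq, hCeq]
  have hkey : pyDictEqA bm tm = true ↔ (FA = [] ∧ FR = [] ∧ FC = []) := by
    rw [pyDictEqA_iff bm tm hbn htn]
    simp only [hFA, hFR, hFC, List.filter_eq_nil_iff]
    constructor
    · rintro ⟨hmem, hget⟩
      refine ⟨?_, ?_, ?_⟩
      · intro a ha
        have hm : a ∈ bk := (hmembk a).mpr ((hmem a).mpr ((hmemtk a).mp ha))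
        simp [hm]
      · intro a ha
        have hm : a ∈ tk := (hmemtk a).mpr ((hmem a).mp ((hmembk a).mp ha))
        simp [hm]
      · intro a ha
        simp [hget a ((hmembk a).mp ha)]
    · rintro ⟨h1, h2, h3⟩
      have hmem : ∀ k, k ∈ bm.keys ↔ k ∈ tm.keys := by
        intro k
        constructor
        · intro hk
          have := h2 k ((hmembk k).mpr hk)
          simpa [hmemtk] using this
        · intro hk
          have := h1 k ((hmemtk k).mpr hk)
          simpa [hmembk] using this
      refine ⟨hmem, ?_⟩
      intro k hk
      have hc : k ∈ tk := (hmemtk k).mpr ((hmem k).mp hk)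
      have := h3 k ((hmembk k).mpr hk)
      simp only [Bool.not_eq_true', Bool.and_eq_true, not_and] at this
      have := this (by simpa using hc)
      simpa using this
  by_cases h : pyDictEqA bm tm = true
  · obtain ⟨h1, h2, h3⟩ := hkey.mp h
    simp [h, h1, h2, h3]
  · have hne : ¬ (FA = [] ∧ FR = [] ∧ FC = []) := fun hc => h (hkey.mpr hc)
    have hcond : (FA.isEmpty && FR.isEmpty && FC.isEmpty) = false := by
      cases hE : (FA.isEmpty && FR.isEmpty && FC.isEmpty)
      · rfl
      · exfalso
        apply hne
        simp only [Bool.and_eq_true, List.isEmpty_iff] at hE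
        exact ⟨hE.1.1, hE.1.2, hE.2⟩
    simp only [h, if_false, Bool.false_eq_true, hcond]
    by_cases hfr : FR.isEmpty <;> by_cases hfc : FC.isEmpty <;> simp [hfr, hfc]
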